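-- pv_equiv track=rewrite | github.com/jayanthbottu/Campus-Information-Retrieval-Assistant | train.py | _answer_token_ids
-- ===== SOURCE A (Python) =====
-- def _answer_token_ids(input_ids: list, labels: list) -> tuple[list, list]:
--     """
--     Return only the tokens that belong to the ANSWER portion.
--     During training, question/prompt tokens have label=-100 (ignored).
--     We find where labels stop being -100 -- that is the answer start.
--     """
--     answer_input, answer_label = [], []
--     in_answer = False
--     for inp, lbl in zip(input_ids, labels):
--         if lbl != -100:
--             in_answer = True
--         if in_answer:
--             answer_input.append(inp)
--             answer_label.append(lbl)
--     return answer_input, answer_label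
-- ===== SOURCE B (Python) =====
-- def _answer_token_ids(input_ids: list, labels: list) -> tuple[list, list]:
--     n = min(len(input_ids), len(labels))
--     i = next((k for k in range(n) if labels[k] != -100), None)
--     if i is None:
--         return [], []
--     return input_ids[i:n], labels[i:n]
-- ===== Notes on version B (the rewrite author's own statement) =====
-- stated objective: simpler
-- what changed: Replaces A's latching accumulation loop (a boolean flag plus two growing lists) by a search-then-slice decomposition: find the first non--100 label, then return the two slices from there to the common length.
import Mathlib
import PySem

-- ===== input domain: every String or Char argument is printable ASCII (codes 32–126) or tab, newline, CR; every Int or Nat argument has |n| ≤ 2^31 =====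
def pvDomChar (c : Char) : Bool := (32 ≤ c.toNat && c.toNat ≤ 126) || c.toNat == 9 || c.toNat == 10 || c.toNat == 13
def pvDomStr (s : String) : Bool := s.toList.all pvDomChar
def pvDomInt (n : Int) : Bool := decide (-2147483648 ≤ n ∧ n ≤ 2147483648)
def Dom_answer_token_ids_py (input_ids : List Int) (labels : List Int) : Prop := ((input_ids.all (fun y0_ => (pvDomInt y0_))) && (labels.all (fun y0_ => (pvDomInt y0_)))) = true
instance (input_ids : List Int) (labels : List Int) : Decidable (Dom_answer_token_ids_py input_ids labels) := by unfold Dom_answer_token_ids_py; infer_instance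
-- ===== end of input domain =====

-- B replaces the latching accumulation loop by a search-then-slice decomposition (same O(n) cost, simpler).

-- ===== PORT A =====
-- A's for-loop over zip(input_ids, labels) with the latching flag, as structural recursion
def pvLoopA : List (Int × Int) → Bool → List Int × List Int
  | [], _ => ([], [])
  | (inp, lbl) :: rest, inAnswer =>
    let inAnswer' := if lbl ≠ -100 then true else inAnswer
    let tail := pvLoopA rest inAnswer'
    if inAnswer' then (inp :: tail.1, lbl :: tail.2) else tail

def answer_token_ids_py (input_ids : List Int) (labels : List Int) : List Int × List Int :=
  pvLoopA (input_ids.zip labels) false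

-- ===== PORT B =====
def answer_token_ids_py_alt (input_ids : List Int) (labels : List Int) : List Int × List Int :=
  let n := min input_ids.length labels.length
  match (labels.take n).findIdx? (fun l => l ≠ -100) with
  | none => ([], [])
  | some i => ((input_ids.take n).drop i, (labels.take n).drop i)

-- ===== PRECONDITION & SPEC =====
def Spec_answer_token_ids_py (input_ids : List Int) (labels : List Int) (out : List Int × List Int) : Prop := out = answer_token_ids_py_alt input_ids labels
instance (input_ids : List Int) (labels : List Int) (out : List Int × List Int) : Decidable (Spec_answer_token_ids_py input_ids labels out) := by unfold Spec_answer_token_ids_py; infer_instance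

-- ===== CLAIM (what is proved, stated in full; the proofs are below) =====
def Claim_equal_answer_token_ids_py : Prop := ∀ (input_ids : List Int) (labels : List Int), Dom_answer_token_ids_py input_ids labels → Spec_answer_token_ids_py input_ids labels (answer_token_ids_py input_ids labels)

-- ===== LEMMAS AND PROOFS =====

-- ===== VERDICT (by name: the statement is the Claim_ definition above) =====
-- latched: once the flag is true, every remaining pair is kept
lemma pvLoopA_true (l : List (Int × Int)) :
    pvLoopA l true = (l.map Prod.fst, l.map Prod.snd) := by
  induction l with
  | nil => rfl
  | cons p rest ih =>
    obtain ⟨inp, lbl⟩ := p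
    simp [pvLoopA, ih]

lemma pv_map_fst_zip (xs ys : List Int) :
    (xs.zip ys).map Prod.fst = xs.take (min xs.length ys.length) := by
  induction xs generalizing ys with
  | nil => simp
  | cons x xs ih =>
    cases ys with
    | nil => simp
    | cons y ys => simp [List.zip_cons_cons, ih, Nat.succ_min_succ]

lemma pv_map_snd_zip (xs ys : List Int) :
    (xs.zip ys).map Prod.snd = ys.take (min xs.length ys.length) := by
  induction xs generalizing ys with
  | nil => simp
  | cons x xs ih =>
    cases ys with
    | nil => simp
    | cons y ys => simp [List.zip_cons_cons, ih, Nat.succ_min_succ]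

lemma pv_main (xs ys : List Int) :
    answer_token_ids_py xs ys = answer_token_ids_py_alt xs ys := by
  induction xs generalizing ys with
  | nil => cases ys <;> rfl
  | cons x xs ih =>
    cases ys with
    | nil => rfl
    | cons y ys =>
      by_cases h : y = -100
      · subst h
        have ihy := ih ys
        simp only [answer_token_ids_py, answer_token_ids_py_alt] at ihy ⊢
        simp only [List.zip_cons_cons, List.length_cons, Nat.succ_min_succ,
          List.take_succ_cons]
        have hstep : pvLoopA ((x, (-100 : Int)) :: xs.zip ys) false
            = pvLoopA (xs.zip ys) false := by
          simp [pvLoopA]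
        rw [hstep]
        have hfind : ((-100 : Int) :: ys.take (min xs.length ys.length)).findIdx?
              (fun l => decide ¬ l = -100)
            = ((ys.take (min xs.length ys.length)).findIdx?
              (fun l => decide ¬ l = -100)).map (· + 1) := by
          rw [List.findIdx?_cons]; norm_num
        rw [hfind]
        cases hf : (ys.take (min xs.length ys.length)).findIdx? (fun l => decide ¬ l = -100) with
        | none => rw [hf] at ihy; simpa using ihy
        | some i => rw [hf] at ihy; simpa using ihy
      · simp only [answer_token_ids_py, answer_token_ids_py_alt, List.zip_cons_cons,
          List.length_cons, Nat.succ_min_succ, List.take_succ_cons]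
        rw [List.findIdx?_cons]
        have hstep : pvLoopA ((x, y) :: xs.zip ys) false
            = (x :: ((xs.zip ys).map Prod.fst), y :: ((xs.zip ys).map Prod.snd)) := by
          simp [pvLoopA, h, pvLoopA_true]
        rw [hstep]
        simp [h, pv_map_fst_zip, pv_map_snd_zip]
theorem answer_token_ids_py_spec : Claim_equal_answer_token_ids_py := by
  intro xs ys _
  exact pv_main xs ys
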